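-- pv_equiv track=rewrite | github.com/irina456/PythonProject11.1 | src/generators.py | transactions_descriptions
-- ===== SOURCE A (Python) =====
-- from typing import Any, Generator
--
-- def transactions_descriptions(list_dicts: list[dict[str, Any]]) -> Any:
--     """
--     Функция принимает список словарей с транзакциями и возвращает итератор,
--     выдающий описание каждой операции по очереди
--     :param list_dicts:
--     """
--
--     list_descriptions = []
--
--     if list_dicts == []:
--         yield "пустой список"
--
--     else:
--         list_descriptions = list(dict["description"] for dict in list_dicts if dict.get("description") is not None)
--
--         if list_descriptions != []:
--             for item in list_descriptions:
--                 yield item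
--
--         else:
--             yield "отсутствуют данные о проведенных операциях"
--
--     return ""
-- ===== SOURCE B (Python) =====
-- def transactions_descriptions(list_dicts):
--     """Single streaming pass with a found-flag instead of materializing an
--     intermediate list and re-iterating it."""
--     if list_dicts == []:
--         yield "пустой список"
--         return ""
--     found = False
--     for d in list_dicts:
--         if d.get("description") is not None:
--             found = True
--             yield d["description"]
--     if not found:
--         yield "отсутствуют данные о проведенных операциях"
--     return ""
-- ===== Notes on version B (the rewrite author's own statement) =====
-- stated objective: simpler
-- what changed: Replaces A's build-a-filtered-list-then-reiterate (two passes plus an intermediate list) with one streaming pass that yields each description immediately and tracks a boolean found-flag to emit the placeholder afterwards.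
import Mathlib
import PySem

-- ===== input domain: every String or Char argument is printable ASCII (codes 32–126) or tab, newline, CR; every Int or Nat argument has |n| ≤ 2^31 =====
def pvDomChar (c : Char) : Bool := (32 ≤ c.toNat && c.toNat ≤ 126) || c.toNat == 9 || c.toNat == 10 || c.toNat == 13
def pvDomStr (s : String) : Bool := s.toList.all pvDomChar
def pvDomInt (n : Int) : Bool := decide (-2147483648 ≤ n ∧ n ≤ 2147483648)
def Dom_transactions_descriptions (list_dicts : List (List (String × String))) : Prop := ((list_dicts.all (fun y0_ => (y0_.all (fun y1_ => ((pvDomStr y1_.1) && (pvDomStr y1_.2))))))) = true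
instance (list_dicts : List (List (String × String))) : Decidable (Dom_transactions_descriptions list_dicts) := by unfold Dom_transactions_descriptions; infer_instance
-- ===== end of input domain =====

-- B replaces A's two-pass build-list-then-reiterate with one streaming pass and a found-flag (objective: simpler).


-- ===== PORT A =====
-- dict.get("description") on an assoc list: first match (Python dicts have unique keys)
def pvGetDesc (d : List (String × String)) : Option String := d.lookup "description"

-- A: builds the filtered list first, then either re-yields it or yields the placeholder
def transactions_descriptions (list_dicts : List (List (String × String))) : List String :=
  if list_dicts = [] then ["пустой список"]
  else
    let list_descriptions := list_dicts.filterMap pvGetDesc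
    if list_descriptions ≠ [] then list_descriptions
    else ["отсутствуют данные о проведенных операциях"]

-- ===== PORT B =====
-- B: one streaming pass carrying a found-flag; placeholder appended only if the flag stayed false
def pvStream (found : Bool) : List (List (String × String)) → List String
  | [] => if found then [] else ["отсутствуют данные о проведенных операциях"]
  | d :: rest =>
    match pvGetDesc d with
    | some v => v :: pvStream true rest
    | none => pvStream found rest

def transactions_descriptions_alt (list_dicts : List (List (String × String))) : List String :=
  if list_dicts = [] then ["пустой список"]
  else pvStream false list_dicts

-- ===== PRECONDITION & SPEC =====
def Spec_transactions_descriptions (list_dicts : List (List (String × String))) (out : List String) : Prop := out = transactions_descriptions_alt list_dicts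
instance (list_dicts : List (List (String × String))) (out : List String) : Decidable (Spec_transactions_descriptions list_dicts out) := by unfold Spec_transactions_descriptions; infer_instance

-- ===== CLAIM (what is proved, stated in full; the proofs are below) =====
def Claim_equal_transactions_descriptions : Prop := ∀ (list_dicts : List (List (String × String))), Dom_transactions_descriptions list_dicts → Spec_transactions_descriptions list_dicts (transactions_descriptions list_dicts)

-- ===== LEMMAS AND PROOFS =====

-- ===== VERDICT (by name: the statement is the Claim_ definition above) =====
-- pvStream with the flag set is exactly the filterMap; with it unset it adds the placeholder when empty
theorem pvStream_eq (l : List (List (String × String))) (found : Bool) :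
    pvStream found l =
      if found = true ∨ l.filterMap pvGetDesc ≠ [] then l.filterMap pvGetDesc
      else ["отсутствуют данные о проведенных операциях"] := by
  induction l generalizing found with
  | nil => cases found <;> simp [pvStream]
  | cons d rest ih =>
    cases h : pvGetDesc d <;> simp [pvStream, h, ih]

theorem transactions_descriptions_spec : Claim_equal_transactions_descriptions := by
  intro l _
  unfold Spec_transactions_descriptions transactions_descriptions transactions_descriptions_alt
  by_cases h : l = []
  · simp [h]
  · rw [if_neg h, if_neg h, pvStream_eq]
    by_cases hf : l.filterMap pvGetDesc = [] <;> simp [hf]
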